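-- pv_equiv track=rewrite | github.com/DnlRKorn/zincout | ZINCQuery_updated.py | findEasyVendors
-- ===== SOURCE A (Python) =====
-- def findEasyVendors(urlist):
--     vendors = []
--     goodvendors = ["caymanchem", "chem-space", "indofinechemical", "matrixscientific", "mcule", "molport", "apexbt",
--                   "abovchem", "bldpharm", "targetmol", "trc-canada", "chemscene", "medchemexp", "sigma", "enamine"]
--     for row in urlist:
--         for v in goodvendors:
--             if v in row[0]:
--                 vendors.append(row)
--                 break
--     return vendors
-- ===== SOURCE B (Python) =====
-- import re
--
-- def findEasyVendors(urlist):
--     goodvendors = ["caymanchem", "chem-space", "indofinechemical", "matrixscientific", "mcule", "molport", "apexbt",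
--                   "abovchem", "bldpharm", "targetmol", "trc-canada", "chemscene", "medchemexp", "sigma", "enamine"]
--     pat = re.compile("|".join(map(re.escape, goodvendors)))
--     return [row for row in urlist if pat.search(row[0])]
-- ===== Notes on version B (the rewrite author's own statement) =====
-- stated objective: idiomatic
-- what changed: Replaced the accumulator loop with an inner per-vendor scan-and-break by one precompiled alternation regex and a single filtering comprehension over the rows.
import Mathlib
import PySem

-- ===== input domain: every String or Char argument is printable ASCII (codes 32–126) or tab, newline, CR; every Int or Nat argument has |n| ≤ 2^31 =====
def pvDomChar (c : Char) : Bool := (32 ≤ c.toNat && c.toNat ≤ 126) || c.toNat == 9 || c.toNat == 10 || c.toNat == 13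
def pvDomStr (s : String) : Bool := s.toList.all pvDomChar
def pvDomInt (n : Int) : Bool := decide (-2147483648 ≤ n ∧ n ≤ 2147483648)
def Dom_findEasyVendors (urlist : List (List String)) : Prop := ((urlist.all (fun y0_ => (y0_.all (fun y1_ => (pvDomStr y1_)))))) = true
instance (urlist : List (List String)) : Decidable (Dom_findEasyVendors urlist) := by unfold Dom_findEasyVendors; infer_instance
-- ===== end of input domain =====

-- B replaces A's append-with-break accumulator loop by one precompiled alternation
-- matcher applied in a single filtering comprehension (idiomatic; return value only).

-- ===== PORT A =====
def pvGoodVendors : List String :=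
  ["caymanchem", "chem-space", "indofinechemical", "matrixscientific", "mcule", "molport", "apexbt",
   "abovchem", "bldpharm", "targetmol", "trc-canada", "chemscene", "medchemexp", "sigma", "enamine"]

-- the inner 'for v in goodvendors: if v in row[0]: append; break' loop
def pvInnerLoop : List String → String → Bool
  | [], _ => false
  | v :: vs, s => if PySem.Str.isIn v s then true else pvInnerLoop vs s

def findEasyVendors (urlist : List (List String)) : List (List String) :=
  urlist.foldl
    (fun vendors row =>
      if pvInnerLoop pvGoodVendors (PySem.List.pyGetD row 0 "") then vendors ++ [row] else vendors)
    []

-- ===== PORT B =====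
-- pat.search(row[0]) with pat = re.compile('|'.join(map(re.escape, goodvendors))):
-- an alternation of escaped literals matches iff some alternative occurs as a substring (exact)
def pvPatSearch (s : String) : Bool :=
  pvGoodVendors.any (fun v => PySem.Str.isIn v s)

def findEasyVendors_alt (urlist : List (List String)) : List (List String) :=
  urlist.filter (fun row => pvPatSearch (PySem.List.pyGetD row 0 ""))

-- ===== PRECONDITION & SPEC =====
-- Pre_ excludes inputs containing an empty row, on which the Python A (and B) raise IndexError at row[0].
def Pre_findEasyVendors (urlist : List (List String)) : Prop := ∀ row ∈ urlist, row ≠ []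
instance (urlist : List (List String)) : Decidable (Pre_findEasyVendors urlist) := by unfold Pre_findEasyVendors; infer_instance
def pvWitness_findEasyVendors : List (List String) := [["caymanchem.com"], ["nothing"]]

def Spec_findEasyVendors (urlist : List (List String)) (out : List (List String)) : Prop := out = findEasyVendors_alt urlist
instance (urlist : List (List String)) (out : List (List String)) : Decidable (Spec_findEasyVendors urlist out) := by unfold Spec_findEasyVendors; infer_instance

-- ===== CLAIM (what is proved, stated in full; the proofs are below) =====
def Claim_equal_findEasyVendors : Prop := ∀ (urlist : List (List String)), Dom_findEasyVendors urlist → Pre_findEasyVendors urlist → Spec_findEasyVendors urlist (findEasyVendors urlist)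

-- ===== LEMMAS AND PROOFS =====
-- the break-on-first-hit scan returns true iff some vendor matches
theorem pvInnerLoop_eq_any (vs : List String) (s : String) :
    pvInnerLoop vs s = vs.any (fun v => PySem.Str.isIn v s) := by
  induction vs with
  | nil => rfl
  | cons v vs ih =>
    simp [pvInnerLoop, List.any_cons, ih]

-- ===== VERDICT (by name: the statement is the Claim_ definition above) =====
theorem findEasyVendors_spec : Claim_equal_findEasyVendors := by
  intro urlist _ _
  unfold Spec_findEasyVendors findEasyVendors findEasyVendors_alt pvPatSearch
  rw [PySem.List.foldl_append_if_eq_filter]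
  simp [pvInnerLoop_eq_any]
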